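-- pv_equiv track=rewrite | github.com/Pororo-Study/Programmers-High-Kit | 그래프/방의 개수_현지연.py | solution
-- ===== SOURCE A (Python) =====
-- def solution(arrows):
--     answer = 0
--     visit_xy = set()    # 방문한 좌표
--     visit_line = set()  # 방문한 선분
--
--     dx = [-1, -1, 0, 1, 1, 1, 0, -1]
--     dy = [0, 1, 1, 1, 0, -1, -1, -1]
--
--     # 시작 좌표 초기화
--     x, y = 0, 0
--     visit_xy.add((x, y))
--
--     for i in arrows:
--         for _ in range(2):      # 대각선인 경우를 위해 2번 반복
--             nx = x + dx[i]      # 다음 좌표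
--             ny = y + dy[i]
--             # 이미 방문한 좌표지만, 중복된 선분이 아닌 경우
--             if (nx, ny) in visit_xy and ((x,y),(nx,ny)) not in visit_line:
--                 answer += 1     # 방 증가
--             # 좌표, 선분, 반대선분 방문처리
--             visit_xy.add((nx, ny))
--             visit_line.add(((x,y),(nx,ny)))
--             visit_line.add(((nx,ny),(x,y)))
--             x, y = nx, ny   # 좌표 변경
--
--     return answer
-- ===== SOURCE B (Python) =====
-- def solution(arrows):
--     # Euler's formula on the walked (connected) multigraph: cycles = E - V + 1.
--     DX = [-1, -1, 0, 1, 1, 1, 0, -1]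
--     DY = [0, 1, 1, 1, 0, -1, -1, -1]
--     pos = (0, 0)
--     vertices = {pos}
--     edges = set()
--     for i in arrows:
--         for _ in range(2):  # subdivide so crossing diagonals share a vertex
--             npos = (pos[0] + DX[i], pos[1] + DY[i])
--             vertices.add(npos)
--             edges.add((pos, npos) if pos <= npos else (npos, pos))
--             pos = npos
--     return len(edges) - len(vertices) + 1
-- ===== Notes on version B (the rewrite author's own statement) =====
-- stated objective: alternative
-- what changed: B drops A's per-step visited-vertex/visited-segment room test and conditional counter; the walk only collects the vertex set and a set of canonical (sorted-endpoint) undirected edges, and the answer is Euler's formula E - V + 1 for independent cycles of the connected walked graph.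
import Mathlib
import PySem

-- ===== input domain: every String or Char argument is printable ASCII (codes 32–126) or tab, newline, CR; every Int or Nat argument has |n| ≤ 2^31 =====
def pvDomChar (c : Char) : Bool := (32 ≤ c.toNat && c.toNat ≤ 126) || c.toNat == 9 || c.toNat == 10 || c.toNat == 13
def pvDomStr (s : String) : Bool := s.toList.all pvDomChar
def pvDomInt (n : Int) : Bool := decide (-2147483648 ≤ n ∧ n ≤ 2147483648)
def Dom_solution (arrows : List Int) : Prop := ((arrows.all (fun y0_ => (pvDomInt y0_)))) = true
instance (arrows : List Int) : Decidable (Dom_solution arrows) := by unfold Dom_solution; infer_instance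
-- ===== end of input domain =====

-- B replaces A's per-step room test with Euler's formula (rooms = E - V + 1 on the
-- connected walked graph): the walk only collects vertex/canonical-edge sets (objective: alternative).

-- ===== PORT A =====
def pvDx : List Int := [-1, -1, 0, 1, 1, 1, 0, -1]
def pvDy : List Int := [0, 1, 1, 1, 0, -1, -1, -1]

structure StA where
  ans : Int
  vxy : PySem.Set (Int × Int)
  vline : PySem.Set ((Int × Int) × (Int × Int))
  x : Int
  y : Int

-- one iteration of A's inner 'for _ in range(2)' body; the '.getD 0' on the index is
-- unreached under Pre_solution (Python raises IndexError there and Pre_ excludes it)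
def stepA (i : Int) (s : StA) : StA :=
  let nx := s.x + (PySem.List.pyGet? pvDx i).getD 0
  let ny := s.y + (PySem.List.pyGet? pvDy i).getD 0
  let ans := if (nx, ny) ∈ s.vxy ∧ ((s.x, s.y), (nx, ny)) ∉ s.vline then s.ans + 1 else s.ans
  { ans := ans
    vxy := PySem.Set.add s.vxy (nx, ny)
    vline := PySem.Set.add (PySem.Set.add s.vline ((s.x, s.y), (nx, ny))) ((nx, ny), (s.x, s.y))
    x := nx, y := ny }

def solution (arrows : List Int) : Int :=
  (arrows.foldl (fun s i => (List.range 2).foldl (fun s _ => stepA i s) s)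
    { ans := 0, vxy := PySem.Set.add PySem.Set.empty ((0 : Int), (0 : Int)),
      vline := PySem.Set.empty, x := 0, y := 0 }).ans

-- ===== PORT B =====
-- '(pos, npos) if pos <= npos else (npos, pos)' — Python's lexicographic tuple order
def canonEdge (p q : Int × Int) : (Int × Int) × (Int × Int) :=
  if p.1 < q.1 ∨ (p.1 = q.1 ∧ p.2 ≤ q.2) then (p, q) else (q, p)

structure StB where
  verts : PySem.Set (Int × Int)
  edges : PySem.Set ((Int × Int) × (Int × Int))
  x : Int
  y : Int

def stepB (i : Int) (s : StB) : StB :=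
  let nx := s.x + (PySem.List.pyGet? pvDx i).getD 0
  let ny := s.y + (PySem.List.pyGet? pvDy i).getD 0
  { verts := PySem.Set.add s.verts (nx, ny)
    edges := PySem.Set.add s.edges (canonEdge (s.x, s.y) (nx, ny))
    x := nx, y := ny }

def solution_alt (arrows : List Int) : Int :=
  let f := arrows.foldl (fun s i => (List.range 2).foldl (fun s _ => stepB i s) s)
    { verts := PySem.Set.add PySem.Set.empty ((0 : Int), (0 : Int)),
      edges := PySem.Set.empty, x := 0, y := 0 }
  PySem.Set.len f.edges - PySem.Set.len f.verts + 1

-- ===== PRECONDITION & SPEC =====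
-- Python A indexes dx[i]/dy[i] (lists of length 8) and raises IndexError unless -8 <= i < 8.
def Pre_solution (arrows : List Int) : Prop := ∀ i ∈ arrows, -8 ≤ i ∧ i < 8
instance (arrows : List Int) : Decidable (Pre_solution arrows) := by unfold Pre_solution; infer_instance
def pvWitness_solution : List Int := [6, 6, 6, 4, 4, 4, 2, 2, 2, 0, 0, 0]

def Spec_solution (arrows : List Int) (out : Int) : Prop := out = solution_alt arrows
instance (arrows : List Int) (out : Int) : Decidable (Spec_solution arrows out) := by unfold Spec_solution; infer_instance

-- ===== CLAIM (what is proved, stated in full; the proofs are below) =====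
def Claim_equal_solution : Prop := ∀ (arrows : List Int), Dom_solution arrows → Pre_solution arrows → Spec_solution arrows (solution arrows)

-- ===== LEMMAS AND PROOFS =====

theorem canonEdge_comm (p q : Int × Int) : canonEdge p q = canonEdge q p := by
  obtain ⟨p1, p2⟩ := p; obtain ⟨q1, q2⟩ := q
  simp only [canonEdge]
  split_ifs with h1 h2 h2
  · have h : p1 = q1 ∧ p2 = q2 := by omega
    simp [h.1, h.2]
  · rfl
  · rfl
  · exfalso; omega

theorem canonEdge_eq_or (p q : Int × Int) : canonEdge p q = (p, q) ∨ canonEdge p q = (q, p) := by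
  unfold canonEdge; split_ifs <;> simp

-- the invariant tying A's state to B's state
def LoopInv (a : StA) (b : StB) : Prop :=
  b.x = a.x ∧ b.y = a.y ∧ b.verts = a.vxy ∧
  (∀ p q : Int × Int, ((p, q) ∈ a.vline) ↔ canonEdge p q ∈ b.edges) ∧
  (∀ p q : Int × Int, (p, q) ∈ a.vline → q ∈ a.vxy) ∧
  (a.x, a.y) ∈ a.vxy ∧
  a.ans = PySem.Set.len b.edges - PySem.Set.len b.verts + 1

theorem len_eq {α : Type} (s : PySem.Set α) : PySem.Set.len s = (s.length : Int) := rfl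

theorem inv_step (i : Int) (a : StA) (b : StB) (h : LoopInv a b) : LoopInv (stepA i a) (stepB i b) := by
  obtain ⟨ans, V, L, x, y⟩ := a
  obtain ⟨V2, E, x2, y2⟩ := b
  obtain ⟨hx, hy, hV, hLE, hEnd, hXY, hAns⟩ := h
  simp only at hx hy hV hLE hEnd hXY hAns
  subst hx hy hV
  simp only [LoopInv, stepA, stepB]
  set nx := x2 + (PySem.List.pyGet? pvDx i).getD 0 with hnx
  set ny := y2 + (PySem.List.pyGet? pvDy i).getD 0 with hny
  refine ⟨trivial, trivial, trivial, ?_, ?_, ?_, ?_⟩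
  · intro p q
    simp only [PySem.Set.mem_add]
    constructor
    · rintro ((hm | h1) | h2)
      · exact Or.inl ((hLE p q).1 hm)
      · simp only [Prod.mk.injEq] at h1
        obtain ⟨rfl, rfl⟩ := h1
        exact Or.inr rfl
      · simp only [Prod.mk.injEq] at h2
        obtain ⟨rfl, rfl⟩ := h2
        exact Or.inr (canonEdge_comm _ _)
    · rintro (hm | he)
      · exact Or.inl (Or.inl ((hLE p q).2 hm))
      · rcases canonEdge_eq_or p q with h1 | h1 <;>
          rcases canonEdge_eq_or (x2, y2) (nx, ny) with h2 | h2 <;>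
          rw [h1, h2] at he <;>
          simp only [Prod.mk.injEq] at he <;>
          obtain ⟨e1, e2⟩ := he <;>
          subst e1 <;> subst e2 <;> tauto
  · intro p q hm
    simp only [PySem.Set.mem_add] at hm ⊢
    rcases hm with (hm | h1) | h2
    · exact Or.inl (hEnd p q hm)
    · simp only [Prod.mk.injEq] at h1
      exact Or.inr h1.2
    · simp only [Prod.mk.injEq] at h2
      exact Or.inl (h2.2 ▸ hXY)
  · simp [PySem.Set.mem_add]
  · by_cases hmem : ((x2, y2), (nx, ny)) ∈ L
    · have heE : canonEdge (x2, y2) (nx, ny) ∈ E := (hLE _ _).1 hmem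
      have hnV : (nx, ny) ∈ V2 := hEnd _ _ hmem
      rw [if_neg (fun hc => hc.2 hmem), PySem.Set.add_of_mem heE, PySem.Set.add_of_mem hnV]
      exact hAns
    · have heE : canonEdge (x2, y2) (nx, ny) ∉ E := fun hc => hmem ((hLE _ _).2 hc)
      rw [PySem.Set.add_of_not_mem heE]
      by_cases hnV : (nx, ny) ∈ V2
      · rw [if_pos ⟨hnV, hmem⟩, PySem.Set.add_of_mem hnV]
        simp only [len_eq, List.length_append, List.length_cons, List.length_nil] at hAns ⊢
        omega
      · rw [if_neg (fun hc => hnV hc.1), PySem.Set.add_of_not_mem hnV]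
        simp only [len_eq, List.length_append, List.length_cons, List.length_nil] at hAns ⊢
        omega

theorem inv_fold (arrows : List Int) (a : StA) (b : StB) (h : LoopInv a b) :
    LoopInv (arrows.foldl (fun s i => (List.range 2).foldl (fun s _ => stepA i s) s) a)
        (arrows.foldl (fun s i => (List.range 2).foldl (fun s _ => stepB i s) s) b) := by
  induction arrows generalizing a b with
  | nil => exact h
  | cons i rest ih =>
      simp only [List.foldl_cons]
      exact ih _ _ (by
        show LoopInv ((List.range 2).foldl (fun s _ => stepA i s) a) _
        simp only [List.range_succ, List.range_zero, List.foldl_append, List.foldl_cons,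
          List.foldl_nil, List.nil_append]
        exact inv_step i _ _ (inv_step i _ _ h))

-- ===== VERDICT (by name: the statement is the Claim_ definition above) =====
theorem solution_spec : Claim_equal_solution := by
  intro arrows _ _
  unfold Spec_solution solution solution_alt
  have h := inv_fold arrows
    { ans := 0, vxy := PySem.Set.add PySem.Set.empty ((0 : Int), (0 : Int)),
      vline := PySem.Set.empty, x := 0, y := 0 }
    { verts := PySem.Set.add PySem.Set.empty ((0 : Int), (0 : Int)),
      edges := PySem.Set.empty, x := 0, y := 0 }
    (by unfold LoopInv; refine ⟨rfl, rfl, rfl, ?_, ?_, ?_, ?_⟩ <;> simp [PySem.Set.add, PySem.Set.empty, PySem.Set.len])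
  exact h.2.2.2.2.2.2
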